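-- pv_equiv track=rewrite | github.com/bmp-media/automation | national.py | get_time_interval
-- ===== SOURCE A (Python) =====
-- def get_time_interval(time: str) -> str:
--     '''Возвращает интервал времени'''
--     hours = int(time[:2])
--
--     intervals = {
--         (6, 8): '06:00:00 - 09:00:00',
--         (9, 12): '09:00:00 - 13:00:00',
--         (13, 15): '13:00:00 - 16:00:00',
--         (16, 18): '16:00:00 - 19:00:00',
--         (19, 21): '19:00:00 - 22:00:00',
--         (22, 23): '22:00:00 - 00:00:00',
--         (0, 5): '00:00:00 - 06:00:00'
--     }
--
--     for interval, result in intervals.items():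
--         if interval[0] <= hours <= interval[1]:
--             return result
-- ===== SOURCE B (Python) =====
-- _TABLE = (
--     ['00:00:00 - 06:00:00'] * 6 +
--     ['06:00:00 - 09:00:00'] * 3 +
--     ['09:00:00 - 13:00:00'] * 4 +
--     ['13:00:00 - 16:00:00'] * 3 +
--     ['16:00:00 - 19:00:00'] * 3 +
--     ['19:00:00 - 22:00:00'] * 3 +
--     ['22:00:00 - 00:00:00'] * 2
-- )
--
--
-- def get_time_interval(time: str) -> str:
--     '''Возвращает интервал времени'''
--     hours = int(time[:2])
--     if 0 <= hours < 24:
--         return _TABLE[hours]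
-- ===== Notes on version B (the rewrite author's own statement) =====
-- stated objective: idiomatic
-- what changed: Replaced A's scan over a dict of (lo,hi)->string range entries with a precomputed 24-element lookup table indexed directly by the hour, guarded by a single range check.
import Mathlib
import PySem

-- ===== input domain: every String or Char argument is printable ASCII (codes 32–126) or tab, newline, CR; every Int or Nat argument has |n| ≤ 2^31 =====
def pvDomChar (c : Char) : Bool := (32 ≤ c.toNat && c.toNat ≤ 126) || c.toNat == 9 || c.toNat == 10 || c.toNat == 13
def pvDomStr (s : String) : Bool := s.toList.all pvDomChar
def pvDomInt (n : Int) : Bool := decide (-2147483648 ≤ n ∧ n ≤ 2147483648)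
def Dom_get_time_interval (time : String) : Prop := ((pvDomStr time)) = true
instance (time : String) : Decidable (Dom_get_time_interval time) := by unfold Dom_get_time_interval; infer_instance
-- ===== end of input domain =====

-- B replaces A's scan over (lo,hi)->string range entries with a precomputed 24-entry
-- lookup table indexed by the hour (idiomatic; same cost at this size).


-- ===== PORT A =====
-- the dict literal of A, as an association list in insertion order
def pvIntervalsA : List ((Int × Int) × String) :=
  [((6, 8), "06:00:00 - 09:00:00"),
   ((9, 12), "09:00:00 - 13:00:00"),
   ((13, 15), "13:00:00 - 16:00:00"),
   ((16, 18), "16:00:00 - 19:00:00"),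
   ((19, 21), "19:00:00 - 22:00:00"),
   ((22, 23), "22:00:00 - 00:00:00"),
   ((0, 5), "00:00:00 - 06:00:00")]

-- A's 'for interval, result in intervals.items(): if … return result' loop
def pvScanA (hours : Int) : List ((Int × Int) × String) → Option String
  | [] => none
  | (interval, result) :: rest =>
      if interval.1 ≤ hours ∧ hours ≤ interval.2 then some result else pvScanA hours rest

def get_time_interval (time : String) : Option String :=
  match PySem.Int.ofStr? (PySem.Str.slice time none (some 2)) with
  | none => none  -- ValueError from int(time[:2]); excluded by Pre_
  | some hours => pvScanA hours pvIntervalsA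

-- ===== PORT B =====
-- Source B's module-level _TABLE, built by list replication and concatenation
def pvTableB : List String :=
  List.replicate 6 "00:00:00 - 06:00:00" ++
  List.replicate 3 "06:00:00 - 09:00:00" ++
  List.replicate 4 "09:00:00 - 13:00:00" ++
  List.replicate 3 "13:00:00 - 16:00:00" ++
  List.replicate 3 "16:00:00 - 19:00:00" ++
  List.replicate 3 "19:00:00 - 22:00:00" ++
  List.replicate 2 "22:00:00 - 00:00:00"

def get_time_interval_alt (time : String) : Option String :=
  match PySem.Int.ofStr? (PySem.Str.slice time none (some 2)) with
  | none => none  -- ValueError from int(time[:2]); excluded by Pre_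
  | some hours =>
      if 0 ≤ hours ∧ hours < 24 then PySem.List.pyGet? pvTableB hours else none

-- ===== PRECONDITION & SPEC =====
-- Pre_ excludes exactly the inputs where int(time[:2]) raises ValueError in both programs.
def Pre_get_time_interval (time : String) : Prop :=
  (PySem.Int.ofStr? (PySem.Str.slice time none (some 2))).isSome = true
instance (time : String) : Decidable (Pre_get_time_interval time) := by
  unfold Pre_get_time_interval; infer_instance
def pvWitness_get_time_interval : String := "12:30"

def Spec_get_time_interval (time : String) (out : Option String) : Prop := out = get_time_interval_alt time
instance (time : String) (out : Option String) : Decidable (Spec_get_time_interval time out) := by unfold Spec_get_time_interval; infer_instance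

-- ===== CLAIM (what is proved, stated in full; the proofs are below) =====
def Claim_equal_get_time_interval : Prop := ∀ (time : String), Dom_get_time_interval time → Pre_get_time_interval time → Spec_get_time_interval time (get_time_interval time)

-- ===== LEMMAS AND PROOFS =====
lemma pvScan_eq_table (h : Int) :
    pvScanA h pvIntervalsA =
      (if 0 ≤ h ∧ h < 24 then PySem.List.pyGet? pvTableB h else none) := by
  by_cases hr : 0 ≤ h ∧ h < 24
  · obtain ⟨h1, h2⟩ := hr
    interval_cases h <;> decide
  · simp only [pvScanA, pvIntervalsA, if_neg hr]
    split_ifs <;> first | rfl | omega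

-- ===== VERDICT (by name: the statement is the Claim_ definition above) =====
theorem get_time_interval_spec : Claim_equal_get_time_interval := by
  intro time _ hpre
  obtain ⟨h, hh⟩ := Option.isSome_iff_exists.mp hpre
  unfold Spec_get_time_interval get_time_interval get_time_interval_alt
  rw [hh]
  exact pvScan_eq_table h
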